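-- pv_equiv track=rewrite | github.com/De777uRe/Algorithm_Practice | my_adjacent_nums.py | adjacent_nums
-- ===== SOURCE A (Python) =====
-- def adjacent_nums(n):
--     output_list = []
--     valid_nums = {1: [i for i in range(10)]}
--
--     for num in range(n+1):
--         if num in valid_nums[1]:
--             output_list.append(num)
--         else:
--             num_copy = num
--             num_copy_string = str(num_copy)
--             is_valid = True
--             while len(str(num_copy)) > max(valid_nums.keys()):
--                 if abs(int(num_copy_string[-1]) - int(num_copy_string[-2])) == 1:
--                     num_copy //= 10
--                     num_copy_string = str(num_copy)
--                 else:
--                     is_valid = False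
--                     break
--             if num_copy in [number for sublist in valid_nums.values() for number in sublist]:
--                 output_list.append(num)
--
--     return output_list
-- ===== SOURCE B (Python) =====
-- def adjacent_nums(n):
--     # generate "stepping numbers" level by level (by digit count) instead of testing every number up to n
--     out = list(range(min(n, 9) + 1))
--     level = list(range(1, 10))
--     for _ in range(len(str(n))):
--         level = [10 * x + d for x in level
--                  for d in (x % 10 - 1, x % 10 + 1)
--                  if 0 <= d <= 9 and 10 * x + d <= n]
--         out += level
--     return out
-- ===== Notes on version B (the rewrite author's own statement) =====
-- stated objective: faster
-- what changed: A tests every number from zero to n with a per-number string-digit stripping loop; B generates the valid stepping numbers directly, level by digit count, by extending each already-valid number with an adjacent digit and keeping only those not exceeding n, so it never scans the full range.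
import Mathlib
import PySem

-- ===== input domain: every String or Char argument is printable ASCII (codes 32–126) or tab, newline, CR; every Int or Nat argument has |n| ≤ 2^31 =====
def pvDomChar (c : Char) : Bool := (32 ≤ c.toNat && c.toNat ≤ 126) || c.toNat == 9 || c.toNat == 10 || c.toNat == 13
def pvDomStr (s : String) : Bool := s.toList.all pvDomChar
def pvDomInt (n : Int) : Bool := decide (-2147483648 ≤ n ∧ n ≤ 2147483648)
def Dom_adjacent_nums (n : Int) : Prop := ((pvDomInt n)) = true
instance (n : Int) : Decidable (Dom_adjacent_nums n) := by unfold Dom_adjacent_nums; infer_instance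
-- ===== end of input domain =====

-- B generates the valid ("stepping") numbers level by level instead of testing every number up to n (objective: faster).

-- ===== PORT A =====
-- valid_nums = {1: [i for i in range(10)]}
def validNumsA : PySem.Dict Int (List Int) :=
  PySem.Dict.empty.insert 1 ((PySem.List.pyRange 0 10 1).map (fun i => i))

-- the while loop of A: returns the final value of num_copy (is_valid is never read afterwards)
def aLoop (c : Int) : Int :=
  if hg : PySem.Str.len (PySem.Int.toStr c) > (PySem.List.max? (PySem.Dict.keys validNumsA) (fun k => k)).getD 0 then
    match h1 : PySem.Str.pyGet? (PySem.Int.toStr c) (-1), h2 : PySem.Str.pyGet? (PySem.Int.toStr c) (-2) with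
    | some c1, some c2 =>
      -- int(num_copy_string[-1]), int(num_copy_string[-2]); a parse failure would be a ValueError,
      -- unreachable because num is a nonnegative decimal numeral here
      match h3 : PySem.Int.ofChars? [c1], h4 : PySem.Int.ofChars? [c2] with
      | some d1, some d2 =>
        if (d1 - d2).natAbs = 1 then aLoop (PySem.Int.floordiv c 10) else c
      | _, _ => c
    | _, _ => c   -- unreachable: the length guard ensures both indices exist
  else c
termination_by c.natAbs
decreasing_by
  have hc : 2 ≤ c.natAbs := by
    by_contra hcc
    have hc3 : c = -1 ∨ c = 0 ∨ c = 1 := by omega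
    rcases hc3 with rfl | rfl | rfl
    · rw [show PySem.Str.pyGet? (PySem.Int.toStr (-1)) (-2) = some '-' from rfl] at h2
      injection h2 with h2'
      subst h2'
      simp [show PySem.Int.ofChars? ['-'] = none from rfl] at h4
    · exact absurd hg (by decide)
    · exact absurd hg (by decide)
  rw [PySem.Int.floordiv_eq_ediv_of_pos (by norm_num)]
  omega

def adjacent_nums (n : Int) : List Int :=
  (PySem.List.pyRange 0 (n + 1) 1).foldl
    (fun output_list num =>
      if (PySem.Dict.getD validNumsA 1 []).contains num then
        output_list ++ [num]
      else
        if ((PySem.Dict.values validNumsA).flatMap (fun sublist => sublist.map (fun number => number))).contains (aLoop num) then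
          output_list ++ [num]
        else output_list)
    []

-- ===== PORT B =====
def bChildren (n x : Int) : List Int :=
  (([PySem.Int.mod x 10 - 1, PySem.Int.mod x 10 + 1]).filter
      (fun d => decide (0 ≤ d) && decide (d ≤ 9) && decide (10 * x + d ≤ n))).map
    (fun d => 10 * x + d)

def bLoop (n : Int) : Nat → List Int → List Int → List Int
  | 0, _, out => out
  | f + 1, level, out =>
    let level' := level.flatMap (bChildren n)
    bLoop n f level' (out ++ level')

def adjacent_nums_alt (n : Int) : List Int :=
  bLoop n (PySem.Str.len (PySem.Int.toStr n)).toNat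
    (PySem.List.pyRange 1 10 1)
    (PySem.List.pyRange 0 (min n 9 + 1) 1)

-- ===== PRECONDITION & SPEC =====
def Spec_adjacent_nums (n : Int) (out : List Int) : Prop := out = adjacent_nums_alt n
instance (n : Int) (out : List Int) : Decidable (Spec_adjacent_nums n out) := by unfold Spec_adjacent_nums; infer_instance

-- ===== CLAIM (what is proved, stated in full; the proofs are below) =====
def Claim_equal_adjacent_nums : Prop := ∀ (n : Int), Dom_adjacent_nums n → Spec_adjacent_nums n (adjacent_nums n)

-- ===== LEMMAS AND PROOFS =====

-- the decimal digit characters of a natural number (proof-side characterisation of Nat.toDigits 10)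
def goDigits (m : Nat) : List Char :=
  if h : m < 10 then [Nat.digitChar m]
  else goDigits (m / 10) ++ [Nat.digitChar (m % 10)]
termination_by m
decreasing_by omega

-- valN m : all adjacent decimal digits of m differ by exactly 1 (single digits count as valid)
def valN (m : Nat) : Bool :=
  if h : m < 10 then true
  else (((m % 10 : Nat) : Int) - ((m / 10 % 10 : Nat) : Int)).natAbs == 1 && valN (m / 10)
termination_by m
decreasing_by omega

lemma toDigitsCore_eq (f : Nat) : ∀ (m : Nat) (acc : List Char), m < 10 ^ f → 0 < f →
    Nat.toDigitsCore 10 f m acc = goDigits m ++ acc := by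
  induction f with
  | zero => omega
  | succ f ih =>
    intro m acc hm _
    rw [Nat.toDigitsCore]
    by_cases h10 : m < 10
    · have h0 : m / 10 = 0 := by omega
      rw [goDigits]
      simp [h0, Nat.mod_eq_of_lt h10, h10]
    · have h0 : ¬ m / 10 = 0 := by omega
      have hf : 0 < f := by
        by_contra hf
        have : f = 0 := by omega
        subst this
        simp at hm
        omega
      simp only [h0, if_false]
      rw [ih (m / 10) _ (by
        have : 10 ^ (f + 1) = 10 ^ f * 10 := by ring
        omega) hf]
      have hm2 : goDigits m = goDigits (m / 10) ++ [Nat.digitChar (m % 10)] := by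
        rw [goDigits, dif_neg (by omega)]
      rw [hm2]
      simp

lemma toChars_eq (c : Int) (h : 0 ≤ c) : PySem.Int.toChars c = goDigits c.toNat := by
  unfold PySem.Int.toChars
  rw [if_neg (by omega)]
  unfold Nat.toDigits
  rw [toDigitsCore_eq (c.toNat + 1) c.toNat [] (by
    have := Nat.lt_pow_self (n := c.toNat) (a := 10) (by norm_num)
    calc c.toNat < 10 ^ c.toNat := this
      _ ≤ 10 ^ (c.toNat + 1) := Nat.pow_le_pow_right (by norm_num) (by omega)) (by omega)]
  simp

lemma goDigits_length_pos (m : Nat) : 0 < (goDigits m).length := by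
  rw [goDigits]
  split <;> simp

lemma goDigits_small (m : Nat) (h : m < 10) : goDigits m = [Nat.digitChar m] := by
  rw [goDigits, dif_pos h]

lemma goDigits_big (m : Nat) (h : 10 ≤ m) :
    goDigits m = goDigits (m / 10) ++ [Nat.digitChar (m % 10)] := by
  rw [goDigits, dif_neg (by omega)]

lemma goDigits_length_big (m : Nat) (h : 10 ≤ m) : 1 < (goDigits m).length := by
  rw [goDigits_big m h]
  have := goDigits_length_pos (m / 10)
  simp
  omega

lemma goDigits_getLast? (m : Nat) : (goDigits m).getLast? = some (Nat.digitChar (m % 10)) := by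
  by_cases h : m < 10
  · rw [goDigits_small m h, Nat.mod_eq_of_lt h]
    rfl
  · rw [goDigits_big m (by omega)]
    simp

lemma lt_ten_pow_length (m : Nat) : m < 10 ^ (goDigits m).length := by
  by_cases h : m < 10
  · rw [goDigits_small m h]
    simpa using h
  · rw [goDigits_big m (by omega)]
    have ih := lt_ten_pow_length (m / 10)
    simp only [List.length_append, List.length_cons, List.length_nil]
    have : 10 ^ ((goDigits (m / 10)).length + 0 + 1) = 10 ^ (goDigits (m / 10)).length * 10 := by ring
    rw [this]
    omega
termination_by m
decreasing_by omega

lemma ofChars_digitChar (d : Nat) (h : d < 10) :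
    PySem.Int.ofChars? [Nat.digitChar d] = some (d : Int) := by
  interval_cases d <;> decide

lemma maxKeyA : (PySem.List.max? (PySem.Dict.keys validNumsA) (fun k => k)).getD 0 = 1 := by decide

lemma strLen_toStr (c : Int) (h : 0 ≤ c) :
    PySem.Str.len (PySem.Int.toStr c) = ((goDigits c.toNat).length : Int) := by
  rw [PySem.Str.len_eq, PySem.Int.toList_toStr, toChars_eq c h]

lemma aLoop_small (c : Int) (h0 : 0 ≤ c) (h : c < 10) : aLoop c = c := by
  rw [aLoop, dif_neg]
  rw [strLen_toStr c h0, maxKeyA, goDigits_small c.toNat (by omega)]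
  simp

lemma aLoop_big (c : Int) (h : 10 ≤ c) :
    aLoop c = if (((c.toNat % 10 : Nat) : Int) - ((c.toNat / 10 % 10 : Nat) : Int)).natAbs = 1
      then aLoop (PySem.Int.floordiv c 10) else c := by
  have h0 : (0:Int) ≤ c := by omega
  have hm : 10 ≤ c.toNat := by omega
  have hsplit : (PySem.Int.toStr c).toList
      = goDigits (c.toNat / 10) ++ [Nat.digitChar (c.toNat % 10)] := by
    rw [PySem.Int.toList_toStr, toChars_eq c h0, goDigits_big c.toNat hm]
  have hlen : 1 < (PySem.Int.toStr c).toList.length := by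
    rw [PySem.Int.toList_toStr, toChars_eq c h0]
    exact goDigits_length_big c.toNat hm
  have hx1 : PySem.Str.pyGet? (PySem.Int.toStr c) (-1) = some (Nat.digitChar (c.toNat % 10)) := by
    rw [PySem.Str.pyGet?_eq, PySem.Chars.pyGet?_eq_listPyGet?, hsplit]
    exact PySem.List.pyGet?_neg_one_append_singleton _ _
  have hx2 : PySem.Str.pyGet? (PySem.Int.toStr c) (-2) = some (Nat.digitChar (c.toNat / 10 % 10)) := by
    rw [PySem.Str.pyGet?_eq, PySem.Chars.pyGet?_eq_listPyGet?]
    rw [PySem.List.pyGet?_neg_ofNat _ 2 (by omega) (by omega)]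
    rw [hsplit]
    have hL : 0 < (goDigits (c.toNat / 10)).length := goDigits_length_pos _
    rw [List.getElem?_append_left (by
      simp only [List.length_append, List.length_cons, List.length_nil]
      omega)]
    have := goDigits_getLast? (c.toNat / 10)
    rw [List.getLast?_eq_getElem?] at this
    rw [show (goDigits (c.toNat / 10) ++ [Nat.digitChar (c.toNat % 10)]).length - 2
        = (goDigits (c.toNat / 10)).length - 1 by
          simp only [List.length_append, List.length_cons, List.length_nil]
          omega]
    exact this
  rw [aLoop, dif_pos (by rw [strLen_toStr c h0, maxKeyA]; have := goDigits_length_big c.toNat hm; omega)]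
  split
  case _ c1 c2 h1 h2 =>
    rw [hx1] at h1
    rw [hx2] at h2
    injection h1 with h1'
    injection h2 with h2'
    subst h1'
    subst h2'
    split
    case _ d1 d2 h3 h4 =>
      rw [ofChars_digitChar _ (by omega)] at h3
      rw [ofChars_digitChar _ (by omega)] at h4
      injection h3 with h3'
      injection h4 with h4'
      subst h3'
      subst h4'
      rfl
    case _ h5 =>
      exact absurd (ofChars_digitChar (c.toNat % 10) (by omega)) (by
        intro hcon
        exact (h5 _ _ hcon (ofChars_digitChar (c.toNat / 10 % 10) (by omega))).elim)
  case _ h5 =>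
    exact absurd hx1 (by
      intro hcon
      exact (h5 _ _ hcon hx2).elim)

lemma aLoop_spec (c : Int) (h : 0 ≤ c) :
    (decide (0 ≤ aLoop c) && decide (aLoop c < 10)) = valN c.toNat := by
  by_cases hc : c < 10
  · rw [aLoop_small c h hc, valN, dif_pos (by omega)]
    simp only [Bool.and_eq_true, decide_eq_true_iff] at *
    simp [h, hc]
  · have h10 : (10:Int) ≤ c := by omega
    rw [aLoop_big c h10]
    have hdiv : PySem.Int.floordiv c 10 = c / 10 := PySem.Int.floordiv_eq_ediv_of_pos (by norm_num)
    have htn : (c / 10).toNat = c.toNat / 10 := by omega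
    by_cases hd : (((c.toNat % 10 : Nat) : Int) - ((c.toNat / 10 % 10 : Nat) : Int)).natAbs = 1
    · rw [if_pos hd, hdiv]
      have hrec := aLoop_spec (c / 10) (by omega)
      rw [hrec, htn]
      conv_rhs => rw [valN]
      rw [dif_neg (by omega)]
      have hb : ((((c.toNat % 10 : Nat) : Int) - ((c.toNat / 10 % 10 : Nat) : Int)).natAbs == 1) = true := by
        simpa using hd
      rw [hb, Bool.true_and]
    · rw [if_neg hd]
      conv_rhs => rw [valN]
      rw [dif_neg (by omega)]
      have hd' : ((((c.toNat % 10 : Nat) : Int) - ((c.toNat / 10 % 10 : Nat) : Int)).natAbs == 1) = false := by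
        simpa using hd
      rw [hd']
      simp [hc]
termination_by c.natAbs
decreasing_by omega

lemma contains_digits (y : Int) :
    (([0, 1, 2, 3, 4, 5, 6, 7, 8, 9] : List Int).contains y) = (decide (0 ≤ y) && decide (y < 10)) := by
  rw [Bool.eq_iff_iff]
  simp
  omega

lemma adjA (n : Int) :
    adjacent_nums n = (PySem.List.pyRange 0 (n + 1) 1).filter (fun m => valN m.toNat) := by
  unfold adjacent_nums
  have hv : PySem.Dict.getD validNumsA 1 [] = [0, 1, 2, 3, 4, 5, 6, 7, 8, 9] := by decide
  have hf : (PySem.Dict.values validNumsA).flatMap (fun sublist => sublist.map (fun number => number))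
      = [0, 1, 2, 3, 4, 5, 6, 7, 8, 9] := by decide
  rw [hv, hf]
  have hfun : (fun (output_list : List Int) (num : Int) =>
        if (([0, 1, 2, 3, 4, 5, 6, 7, 8, 9] : List Int).contains num) = true then output_list ++ [num]
        else
          if (([0, 1, 2, 3, 4, 5, 6, 7, 8, 9] : List Int).contains (aLoop num)) = true then output_list ++ [num]
          else output_list)
      = (fun (output_list : List Int) (num : Int) =>
        if ((([0, 1, 2, 3, 4, 5, 6, 7, 8, 9] : List Int).contains num
            || ([0, 1, 2, 3, 4, 5, 6, 7, 8, 9] : List Int).contains (aLoop num))) = true then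
          output_list ++ [(fun (x : Int) => x) num]
        else output_list) := by
    funext out num
    cases h1 : (([0, 1, 2, 3, 4, 5, 6, 7, 8, 9] : List Int).contains num) <;>
      cases h2 : (([0, 1, 2, 3, 4, 5, 6, 7, 8, 9] : List Int).contains (aLoop num)) <;>
      simp only [h1, h2, Bool.true_or, Bool.false_or, Bool.or_self] <;> simp
  rw [hfun, PySem.List.foldl_append_if]
  rw [List.map_id_fun']
  rw [List.nil_append]
  apply List.filter_congr
  intro x hx
  have hx0 : 0 ≤ x := (PySem.List.mem_pyRange_one.mp hx).1
  rw [contains_digits, contains_digits, aLoop_spec x hx0]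
  by_cases hlt : x < 10
  · rw [Bool.eq_iff_iff]
    rw [valN, dif_pos (by omega)]
    simp [hx0, hlt]
  · have h1 : (decide (0 ≤ x) && decide (x < 10)) = false := by simp [hlt]
    rw [h1, Bool.false_or]

-- ---- B side ----

lemma mem_bChildren {n x m : Int} (hx : 1 ≤ x) :
    m ∈ bChildren n x ↔ m / 10 = x ∧ (m % 10 - x % 10).natAbs = 1 ∧ m ≤ n := by
  unfold bChildren
  rw [PySem.Int.mod_eq_emod_of_pos (by norm_num)]
  simp only [List.mem_map, List.mem_filter, List.mem_cons,
    Bool.and_eq_true, decide_eq_true_iff]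
  have hx10a : 0 ≤ x % 10 := Int.emod_nonneg x (by norm_num)
  have hx10b : x % 10 < 10 := Int.emod_lt_of_pos x (by norm_num)
  constructor
  · rintro ⟨d, ⟨hd, ⟨⟨hd0, hd9⟩, hdn⟩⟩, rfl⟩
    rcases hd with rfl | rfl | hd
    · exact ⟨by omega, by omega, hdn⟩
    · exact ⟨by omega, by omega, hdn⟩
    · exact absurd hd (List.not_mem_nil)
  · rintro ⟨hdiv, habs, hle⟩
    have h1 : 0 ≤ m % 10 := Int.emod_nonneg m (by norm_num)
    have h2 : m % 10 < 10 := Int.emod_lt_of_pos m (by norm_num)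
    refine ⟨m % 10, ⟨?_, ⟨⟨h1, by omega⟩, by omega⟩⟩, by omega⟩
    have hcase : m % 10 = x % 10 - 1 ∨ m % 10 = x % 10 + 1 := by omega
    rcases hcase with h | h
    · exact Or.inl h
    · exact Or.inr (Or.inl h)

lemma pairwise_bChildren (n x : Int) : (bChildren n x).Pairwise (· < ·) := by
  unfold bChildren
  apply List.Pairwise.map (R := fun a b : Int => a < b)
  · intro a b hab
    omega
  · apply List.Pairwise.filter
    simp

lemma bChildren_nil (n x : Int) (hx : 0 ≤ x) (h : n < 10 * x) : bChildren n x = [] := by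
  unfold bChildren
  rw [List.map_eq_nil_iff, List.filter_eq_nil_iff]
  intro d hd
  simp only [Bool.and_eq_true, decide_eq_true_iff]
  rintro ⟨⟨hd0, hd9⟩, hdn⟩
  omega

lemma eq_of_pairwise_lt_mem (l1 l2 : List Int)
    (h1 : l1.Pairwise (· < ·)) (h2 : l2.Pairwise (· < ·))
    (hm : ∀ x, x ∈ l1 ↔ x ∈ l2) : l1 = l2 := by
  have hperm : l1.Perm l2 := by
    rw [List.perm_ext_iff_of_nodup (h1.imp ne_of_lt) (h2.imp ne_of_lt)]
    exact hm
  exact List.eq_of_perm_of_sorted (le := (· ≤ ·))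
    (fun a b _ _ hab hba => le_antisymm hab hba)
    (h1.imp le_of_lt) (h2.imp le_of_lt) hperm

lemma flatMap_congr_nil {α β : Type} (l : List α) (f : α → List β) (q : α → Bool)
    (h : ∀ x ∈ l, q x = false → f x = []) : l.flatMap f = (l.filter q).flatMap f := by
  induction l with
  | nil => rfl
  | cons a l ih =>
    rw [List.flatMap_cons, List.filter_cons]
    cases hq : q a
    · rw [h a List.mem_cons_self hq, List.nil_append]
      simp only [Bool.false_eq_true, if_false]
      exact ih (fun x hx => h x (List.mem_cons_of_mem a hx))
    · simp only [if_true]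
      rw [List.flatMap_cons]
      rw [ih (fun x hx => h x (List.mem_cons_of_mem a hx))]

lemma filter_and_le (p : Int → Bool) (a b n : Int) :
    (PySem.List.pyRange a b 1).filter (fun x => p x && decide (x ≤ n))
      = (PySem.List.pyRange a (min b (n + 1)) 1).filter p := by
  by_cases hb : b ≤ n + 1
  · rw [min_eq_left hb]
    apply List.filter_congr
    intro x hx
    have hx' := PySem.List.mem_pyRange_one.mp hx
    have hd : decide (x ≤ n) = true := decide_eq_true (by omega)
    rw [hd, Bool.and_true]
  · by_cases ha : a ≤ n + 1
    · rw [min_eq_right (by omega), PySem.List.pyRange_one_append a (n + 1) b ha (by omega),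
        List.filter_append]
      have h2 : (PySem.List.pyRange (n + 1) b 1).filter (fun x => p x && decide (x ≤ n)) = [] := by
        rw [List.filter_eq_nil_iff]
        intro x hx
        have hx' := PySem.List.mem_pyRange_one.mp hx
        simp only [Bool.and_eq_true, decide_eq_true_iff, not_and]
        intro _
        omega
      rw [h2, List.append_nil]
      apply List.filter_congr
      intro x hx
      have hx' := PySem.List.mem_pyRange_one.mp hx
      have hd : decide (x ≤ n) = true := decide_eq_true (by omega)
      rw [hd, Bool.and_true]
    · rw [min_eq_right (by omega), PySem.List.pyRange_one_eq_nil (show (n + 1 : Int) ≤ a by omega),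
        List.filter_nil, List.filter_eq_nil_iff]
      intro x hx
      have hx' := PySem.List.mem_pyRange_one.mp hx
      simp only [Bool.and_eq_true, decide_eq_true_iff, not_and]
      intro _
      omega

lemma level_step (n a b : Int) (ha : 1 ≤ a) :
    ((PySem.List.pyRange a b 1).filter (fun x => valN x.toNat && decide (x ≤ n))).flatMap (bChildren n)
      = (PySem.List.pyRange (10 * a) (10 * b) 1).filter (fun m => valN m.toNat && decide (m ≤ n)) := by
  apply eq_of_pairwise_lt_mem
  · rw [List.pairwise_flatMap]
    constructor
    · intro x _
      exact pairwise_bChildren n x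
    · have hp : ((PySem.List.pyRange a b 1).filter (fun x => valN x.toNat && decide (x ≤ n))).Pairwise (· < ·) :=
        List.Pairwise.filter _ (PySem.List.pairwise_lt_pyRange_one a b)
      refine hp.imp_of_mem ?_
      intro x y hxm hym hxy m hm m' hm'
      have hx1 : 1 ≤ x := by
        have := PySem.List.mem_pyRange_one.mp (List.mem_of_mem_filter hxm)
        omega
      have hy1 : 1 ≤ y := by
        have := PySem.List.mem_pyRange_one.mp (List.mem_of_mem_filter hym)
        omega
      have h1 := (mem_bChildren hx1).mp hm
      have h2 := (mem_bChildren hy1).mp hm'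
      omega
  · exact List.Pairwise.filter _ (PySem.List.pairwise_lt_pyRange_one _ _)
  · intro m
    simp only [List.mem_flatMap, List.mem_filter, PySem.List.mem_pyRange_one]
    constructor
    · rintro ⟨x, ⟨⟨hxr, hq⟩, hm⟩⟩
      have hx1 : 1 ≤ x := by omega
      obtain ⟨hdiv, habs, hle⟩ := (mem_bChildren hx1).mp hm
      simp only [Bool.and_eq_true, decide_eq_true_iff] at hq
      have hval : valN m.toNat = true := by
        rw [valN, dif_neg (by omega)]
        simp only [Bool.and_eq_true, beq_iff_eq]
        have hm0 : 0 ≤ m := by omega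
        constructor
        · have e1 : ((m.toNat % 10 : Nat) : Int) = m % 10 := by omega
          have e2 : ((m.toNat / 10 % 10 : Nat) : Int) = x % 10 := by omega
          rw [e1, e2]
          exact habs
        · have ht : m.toNat / 10 = x.toNat := by omega
          rw [ht]
          exact hq.1
      constructor
      · omega
      · simp only [Bool.and_eq_true, decide_eq_true_iff]
        exact ⟨hval, hle⟩
    · rintro ⟨⟨hm1, hm2⟩, hq⟩
      simp only [Bool.and_eq_true, decide_eq_true_iff] at hq
      obtain ⟨hval, hle⟩ := hq
      have hm10 : (10:Int) ≤ m := by omega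
      rw [valN, dif_neg (by omega)] at hval
      simp only [Bool.and_eq_true, beq_iff_eq] at hval
      obtain ⟨habs, hval2⟩ := hval
      refine ⟨m / 10, ⟨⟨by omega, by omega⟩, ?_⟩, ?_⟩
      · simp only [Bool.and_eq_true, decide_eq_true_iff]
        constructor
        · have ht : (m / 10).toNat = m.toNat / 10 := by omega
          rw [ht]
          exact hval2
        · omega
      · rw [mem_bChildren (by omega)]
        refine ⟨rfl, ?_, hle⟩
        have e1 : ((m.toNat % 10 : Nat) : Int) = m % 10 := by omega
        have e2 : ((m.toNat / 10 % 10 : Nat) : Int) = m / 10 % 10 := by omega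
        rw [e1, e2] at habs
        exact habs

lemma bLoop_nil (n : Int) (f : Nat) (out : List Int) : bLoop n f [] out = out := by
  induction f generalizing out with
  | zero => rfl
  | succ f ih =>
    rw [bLoop]
    simp only [List.flatMap_nil, List.append_nil]
    exact ih out

lemma bLoop_from (n : Int) (f : Nat) : ∀ (a : Int) (out : List Int), 1 ≤ a →
    bLoop n f ((PySem.List.pyRange a (10 * a) 1).filter (fun x => valN x.toNat && decide (x ≤ n))) out
      = out ++ (PySem.List.pyRange (10 * a) ((10 : Int) ^ f * (10 * a)) 1).filter (fun x => valN x.toNat && decide (x ≤ n)) := by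
  induction f with
  | zero =>
    intro a out ha
    rw [bLoop]
    rw [show ((10:Int) ^ 0 * (10 * a)) = 10 * a by ring]
    rw [PySem.List.pyRange_one_eq_nil (by omega), List.filter_nil, List.append_nil]
  | succ f ih =>
    intro a out ha
    rw [bLoop]
    rw [level_step n a (10 * a) ha]
    have h10 : (10 : Int) * (10 * a) = 10 * (10 * a) := rfl
    have := ih (10 * a) (out ++ (PySem.List.pyRange (10 * a) (10 * (10 * a)) 1).filter
        (fun x => valN x.toNat && decide (x ≤ n))) (by omega)
    rw [this, List.append_assoc]
    congr 1
    rw [← List.filter_append]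
    rw [show (10:Int) ^ f * (10 * (10 * a)) = (10:Int) ^ (f + 1) * (10 * a) by ring]
    rw [← PySem.List.pyRange_one_append (10 * a) (10 * (10 * a)) ((10:Int) ^ (f + 1) * (10 * a))
      (by omega) (by
        have hpow : (1 : Int) ≤ (10:Int) ^ f := one_le_pow₀ (by norm_num)
        have : (10:Int) ^ (f + 1) * (10 * a) = (10:Int) ^ f * (10 * (10 * a)) := by ring
        rw [this]
        nlinarith)]

lemma valN_small (x : Int) (h0 : 0 ≤ x) (h : x < 10) : valN x.toNat = true := by
  rw [valN, dif_pos (by omega)]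

lemma first_level (n : Int) :
    (PySem.List.pyRange 1 10 1).flatMap (bChildren n)
      = (PySem.List.pyRange 10 100 1).filter (fun x => valN x.toNat && decide (x ≤ n)) := by
  rw [flatMap_congr_nil (PySem.List.pyRange 1 10 1) (bChildren n)
    (fun x => valN x.toNat && decide (x ≤ n)) (by
      intro x hx hqx
      have hxr := PySem.List.mem_pyRange_one.mp hx
      apply bChildren_nil n x (by omega)
      have hqx2 : (valN x.toNat && decide (x ≤ n)) = false := hqx
      rw [valN_small x (by omega) (by omega), Bool.true_and] at hqx2
      simp only [decide_eq_false_iff_not] at hqx2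
      omega)]
  have := level_step n 1 10 (by norm_num)
  rw [show (10:Int) * 1 = 10 by norm_num, show (10:Int) * 10 = 100 by norm_num] at this
  exact this

lemma adjB (n : Int) (hn : 0 ≤ n) :
    adjacent_nums_alt n = (PySem.List.pyRange 0 (n + 1) 1).filter (fun m => valN m.toNat) := by
  unfold adjacent_nums_alt
  have hf0 : (PySem.Str.len (PySem.Int.toStr n)).toNat = (goDigits n.toNat).length := by
    rw [strLen_toStr n hn]
    exact Int.toNat_natCast _
  obtain ⟨f', hf'⟩ : ∃ f', (goDigits n.toNat).length = f' + 1 :=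
    ⟨(goDigits n.toNat).length - 1, by have := goDigits_length_pos n.toNat; omega⟩
  rw [hf0, hf', bLoop, first_level n]
  rw [show (100:Int) = 10 * 10 by norm_num]
  rw [bLoop_from n f' 10 _ (by norm_num)]
  have hinit : PySem.List.pyRange 0 (min n 9 + 1) 1
      = (PySem.List.pyRange 0 10 1).filter (fun x => valN x.toNat && decide (x ≤ n)) := by
    rw [filter_and_le (fun x => valN x.toNat) 0 10 n]
    rw [show min (10:Int) (n + 1) = min n 9 + 1 by omega]
    symm
    rw [List.filter_eq_self]
    intro x hx
    have hxr := PySem.List.mem_pyRange_one.mp hx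
    exact valN_small x (by omega) (by omega)
  rw [hinit, ← List.filter_append,
    ← PySem.List.pyRange_one_append 0 10 (10 * 10) (by norm_num) (by norm_num),
    ← List.filter_append]
  have hpow0 : (1:Int) ≤ (10:Int) ^ f' := one_le_pow₀ (by norm_num)
  rw [← PySem.List.pyRange_one_append 0 (10 * 10) ((10:Int) ^ f' * (10 * 10)) (by norm_num)
    (by nlinarith)]
  rw [filter_and_le (fun m => valN m.toNat) 0 ((10:Int) ^ f' * (10 * 10)) n]
  have hn1 : n.toNat < 10 ^ (f' + 1) := by
    rw [← hf']
    exact lt_ten_pow_length n.toNat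
  have hn2 : (n:Int) < (10:Int) ^ (f' + 1) := by
    have h1 : ((n.toNat : Int)) = n := by omega
    rw [← h1]
    exact_mod_cast hn1
  have hle : n + 1 ≤ (10:Int) ^ f' * (10 * 10) := by
    have h2 : (10:Int) ^ (f' + 1) = 10 ^ f' * 10 := by ring
    nlinarith
  rw [min_eq_right hle]

-- ===== VERDICT (by name: the statement is the Claim_ definition above) =====
theorem adjacent_nums_spec : Claim_equal_adjacent_nums := by
  intro n _hd
  unfold Spec_adjacent_nums
  by_cases hn : 0 ≤ n
  · rw [adjA, adjB n hn]
  · push_neg at hn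
    have hA : adjacent_nums n = [] := by
      unfold adjacent_nums
      rw [PySem.List.pyRange_one_eq_nil (by omega)]
      rfl
    have hB : adjacent_nums_alt n = [] := by
      unfold adjacent_nums_alt
      rw [min_eq_left (show n ≤ (9:Int) by omega),
        PySem.List.pyRange_one_eq_nil (show n + 1 ≤ (0:Int) by omega)]
      cases hF : (PySem.Str.len (PySem.Int.toStr n)).toNat with
      | zero => rfl
      | succ f =>
        rw [bLoop]
        have hlev1 : (PySem.List.pyRange 1 10 1).flatMap (bChildren n) = [] := by
          rw [List.flatMap_eq_nil_iff]
          intro x hx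
          have hxr := PySem.List.mem_pyRange_one.mp hx
          exact bChildren_nil n x (by omega) (by omega)
        rw [hlev1, bLoop_nil]
        rfl
    rw [hA, hB]
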